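-- pv_equiv track=rewrite | github.com/ShirinRo/euler | 24.py | addMissingNumbers
-- ===== SOURCE A (Python) =====
-- def addMissingNumbers(nsToIgnore, stringSoFar, maxDigit):
--     if len(stringSoFar) == maxDigit + 1:
--         return [stringSoFar]
--     results = []
--     for index in range(maxDigit + 1):
--         if index not in nsToIgnore:
--             mediumResult = stringSoFar + str(index)
--             results += addMissingNumbers(nsToIgnore + [index], mediumResult, maxDigit)
--     return results
-- ===== SOURCE B (Python) =====
-- import itertools
--
-- def addMissingNumbers(nsToIgnore, stringSoFar, maxDigit):
--     available = [d for d in range(maxDigit + 1) if d not in nsToIgnore]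
--     slots = maxDigit + 1 - len(stringSoFar)
--     if slots < 0:
--         return []
--     return [stringSoFar + ''.join(str(d) for d in p)
--             for p in itertools.permutations(available, slots)]
-- ===== Notes on version B (the rewrite author's own statement) =====
-- stated objective: idiomatic
-- what changed: Replaces A's backtracking recursion (which rebuilds and rescans the ignore list at every node and keeps recursing even after the string can no longer reach the target length) with a direct enumeration of the r-permutations of the available digits, itertools.permutations-style, prefixed onto stringSoFar.
import Mathlib
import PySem

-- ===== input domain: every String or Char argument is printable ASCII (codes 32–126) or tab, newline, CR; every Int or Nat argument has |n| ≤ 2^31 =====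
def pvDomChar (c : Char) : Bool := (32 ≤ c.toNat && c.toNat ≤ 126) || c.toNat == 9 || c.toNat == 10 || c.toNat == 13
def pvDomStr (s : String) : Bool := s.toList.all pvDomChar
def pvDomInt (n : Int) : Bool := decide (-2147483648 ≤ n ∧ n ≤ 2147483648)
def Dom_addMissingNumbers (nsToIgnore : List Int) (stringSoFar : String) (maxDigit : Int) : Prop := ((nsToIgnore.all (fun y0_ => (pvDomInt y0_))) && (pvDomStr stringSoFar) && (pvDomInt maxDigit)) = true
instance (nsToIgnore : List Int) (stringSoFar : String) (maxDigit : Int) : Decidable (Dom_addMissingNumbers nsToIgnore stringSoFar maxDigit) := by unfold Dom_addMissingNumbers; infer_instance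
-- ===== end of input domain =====

-- B replaces A's manual backtracking recursion with a direct enumeration of the r-permutations
-- of the still-available digits (itertools.permutations); objective: idiomatic.

-- [d for d in range(maxDigit+1) if d not in nsToIgnore] — the digits still available.
-- (Shared helper: B computes it; A's port uses it only as its termination measure.)
def pvAvail (ns : List Int) (m : Int) : List Int :=
  (PySem.List.pyRange 0 (m + 1) 1).filter (fun d => !ns.contains d)

-- termination lemma for port A: recursing with one more ignored digit shrinks the available set
theorem pvAvail_decrease (ns : List Int) (m i : Int)
    (hi : i ∈ PySem.List.pyRange 0 (m + 1) 1) (h : ns.contains i = false) :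
    (pvAvail (ns ++ [i]) m).length < (pvAvail ns m).length := by
  have hmem : i ∈ pvAvail ns m := List.mem_filter.2 ⟨hi, by rw [h]; rfl⟩
  have heq : pvAvail (ns ++ [i]) m = (pvAvail ns m).filter (fun d => d != i) := by
    unfold pvAvail
    rw [List.filter_filter]
    apply List.filter_congr
    intro x _
    by_cases hx : x ∈ ns <;> by_cases hxi : x = i <;>
      simp [hx, hxi]
  rw [heq]
  exact List.length_filter_lt_length_iff_exists.2 ⟨i, hmem, by simp⟩

-- ===== PORT A =====
def addMissingNumbers (nsToIgnore : List Int) (stringSoFar : String) (maxDigit : Int) : List String :=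
  if PySem.Str.len stringSoFar = maxDigit + 1 then [stringSoFar]
  else
    (PySem.List.pyRange 0 (maxDigit + 1) 1).attach.foldl
      (fun results t =>
        if h : nsToIgnore.contains t.1 then results
        else results ++ addMissingNumbers (nsToIgnore ++ [t.1]) (stringSoFar ++ PySem.Int.toStr t.1) maxDigit)
      []
termination_by (pvAvail nsToIgnore maxDigit).length
decreasing_by
  exact pvAvail_decrease _ _ _ t.2 (by revert h; cases nsToIgnore.contains t.1 <;> simp)

-- ===== PORT B =====
-- itertools.permutations(pool, r), ported for a duplicate-free pool (pvAvail is duplicate-free)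
def pvPerms (xs : List Int) : Nat → List (List Int)
  | 0 => [[]]
  | n + 1 => xs.flatMap (fun x => (pvPerms (xs.erase x) n).map (fun p => x :: p))

-- Source B's locals 'available' and 'slots' are inlined (available = pvAvail, slots = maxDigit+1-len)
def addMissingNumbers_alt (nsToIgnore : List Int) (stringSoFar : String) (maxDigit : Int) : List String :=
  if maxDigit + 1 - PySem.Str.len stringSoFar < 0 then []
  else (pvPerms (pvAvail nsToIgnore maxDigit) (maxDigit + 1 - PySem.Str.len stringSoFar).toNat).map
    (fun p => stringSoFar ++ PySem.Str.join "" (p.map PySem.Int.toStr))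

-- ===== PRECONDITION & SPEC =====
-- Pre_ excludes maxDigit ≥ 10, where the loop indices stringify to MULTI-character pieces: there A's
-- character-count termination truncates index sequences mid-"digit" while B permutes whole indices —
-- an unspecifiable corner (Project-Euler digits are 0..9) on which both values are accidental.
def Pre_addMissingNumbers (_nsToIgnore : List Int) (_stringSoFar : String) (maxDigit : Int) : Prop :=
  maxDigit ≤ 9
instance (nsToIgnore : List Int) (stringSoFar : String) (maxDigit : Int) : Decidable (Pre_addMissingNumbers nsToIgnore stringSoFar maxDigit) := by unfold Pre_addMissingNumbers; infer_instance

def pvWitness_addMissingNumbers : List Int × String × Int := ([2], "0", 2)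

def Spec_addMissingNumbers (nsToIgnore : List Int) (stringSoFar : String) (maxDigit : Int) (out : List String) : Prop := out = addMissingNumbers_alt nsToIgnore stringSoFar maxDigit
instance (nsToIgnore : List Int) (stringSoFar : String) (maxDigit : Int) (out : List String) : Decidable (Spec_addMissingNumbers nsToIgnore stringSoFar maxDigit out) := by unfold Spec_addMissingNumbers; infer_instance

-- ===== CLAIM (what is proved, stated in full; the proofs are below) =====
def Claim_equal_addMissingNumbers : Prop := ∀ (nsToIgnore : List Int) (stringSoFar : String) (maxDigit : Int), Dom_addMissingNumbers nsToIgnore stringSoFar maxDigit → Pre_addMissingNumbers nsToIgnore stringSoFar maxDigit → Spec_addMissingNumbers nsToIgnore stringSoFar maxDigit (addMissingNumbers nsToIgnore stringSoFar maxDigit)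

-- ===== LEMMAS AND PROOFS =====

theorem pvAvail_nodup (ns : List Int) (m : Int) : (pvAvail ns m).Nodup :=
  (PySem.List.nodup_pyRange_one 0 (m + 1)).filter _

theorem pvAvail_append (ns : List Int) (m i : Int) :
    pvAvail (ns ++ [i]) m = (pvAvail ns m).erase i := by
  rw [(pvAvail_nodup ns m).erase_eq_filter]
  unfold pvAvail
  rw [List.filter_filter]
  apply List.filter_congr
  intro x _
  by_cases hx : x ∈ ns <;> by_cases hxi : x = i <;>
    simp [hx, hxi]

theorem mem_pvAvail (ns : List Int) (m x : Int) :
    x ∈ pvAvail ns m ↔ (0 ≤ x ∧ x < m + 1) ∧ ns.contains x = false := by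
  unfold pvAvail
  simp [List.mem_filter, PySem.List.mem_pyRange_one]

theorem toStr_len_one (i : Int) (h0 : 0 ≤ i) (h9 : i < 10) :
    PySem.Str.len (PySem.Int.toStr i) = 1 := by
  interval_cases i <;> decide

theorem join_empty_nil : PySem.Str.join "" ([] : List String) = "" := by
  apply String.ext
  simp [PySem.Str.toList_join, PySem.Chars.join_nil]

theorem join_empty_cons (a : String) (l : List String) :
    PySem.Str.join "" (a :: l) = a ++ PySem.Str.join "" l := by
  apply String.ext
  cases l with
  | nil => simp [PySem.Str.toList_join, PySem.Chars.join_singleton, PySem.Chars.join_nil]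
  | cons b t => simp [PySem.Str.toList_join, PySem.Chars.join_cons_cons]

theorem foldl_if_append {α β : Type} (l : List α) (c : α → Bool) (g : α → List β) (acc : List β) :
    l.foldl (fun r x => if c x then r else r ++ g x) acc
      = acc ++ (l.filter (fun x => !c x)).flatMap g := by
  induction l generalizing acc with
  | nil => simp
  | cons a t ih => by_cases h : c a <;> simp [h, ih]

theorem attach_foldl_if {α β : Type} (l : List α) (c : α → Bool) (g : α → List β) (acc : List β) :
    l.attach.foldl (fun r t => if c t.1 then r else r ++ g t.1) acc
      = acc ++ (l.filter (fun x => !c x)).flatMap g := by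
  rw [List.foldl_attach (f := fun r x => if c x then r else r ++ g x)]
  exact foldl_if_append l c g acc

theorem A_eq_B (m : Int) (hm : m ≤ 9) :
    ∀ (n : Nat) (ns : List Int) (s : String), (pvAvail ns m).length = n →
      addMissingNumbers ns s m = addMissingNumbers_alt ns s m := by
  intro n
  induction n using Nat.strong_induction_on with
  | _ n IH =>
    intro ns s hlen
    rw [addMissingNumbers]
    by_cases hs : PySem.Str.len s = m + 1
    · rw [if_pos hs]
      have h0 : m + 1 - PySem.Str.len s = 0 := by omega
      rw [addMissingNumbers_alt, h0]
      simp [pvPerms, join_empty_nil]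
    · rw [if_neg hs]
      simp only [dite_eq_ite]
      rw [attach_foldl_if (c := fun x => ns.contains x)
        (g := fun x => addMissingNumbers (ns ++ [x]) (s ++ PySem.Int.toStr x) m)]
      rw [List.nil_append,
        show List.filter (fun x => !ns.contains x) (PySem.List.pyRange 0 (m + 1) 1)
          = pvAvail ns m from rfl]
      have hcong : ∀ i ∈ pvAvail ns m,
          addMissingNumbers (ns ++ [i]) (s ++ PySem.Int.toStr i) m
            = addMissingNumbers_alt (ns ++ [i]) (s ++ PySem.Int.toStr i) m := by
        intro i hiav
        obtain ⟨⟨h0i, h1i⟩, hci⟩ := (mem_pvAvail ns m i).1 hiav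
        have hd := pvAvail_decrease ns m i
          (by rw [PySem.List.mem_pyRange_one]; exact ⟨h0i, h1i⟩) hci
        exact IH _ (by omega) _ _ rfl
      have hstep : ∀ i ∈ pvAvail ns m, PySem.Str.len (s ++ PySem.Int.toStr i)
          = PySem.Str.len s + 1 := by
        intro i hiav
        obtain ⟨⟨h0i, h1i⟩, _⟩ := (mem_pvAvail ns m i).1 hiav
        rw [PySem.Str.len_append, toStr_len_one i h0i (by omega)]
      rw [show (pvAvail ns m).flatMap
            (fun i => addMissingNumbers (ns ++ [i]) (s ++ PySem.Int.toStr i) m)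
          = (pvAvail ns m).flatMap
            (fun i => addMissingNumbers_alt (ns ++ [i]) (s ++ PySem.Int.toStr i) m) from by
        rw [List.flatMap_def, List.flatMap_def, List.map_congr_left hcong]]
      by_cases hneg : m + 1 - PySem.Str.len s < 0
      · -- len(s) already exceeds the target: every branch (and B) yields []
        simp only [addMissingNumbers_alt]
        rw [if_pos hneg]
        apply List.flatMap_eq_nil_iff.2
        intro i hiav
        rw [hstep i hiav]
        rw [if_pos (by omega)]
      · have hpos : 0 < m + 1 - PySem.Str.len s := by
          rcases lt_or_eq_of_le (not_lt.1 hneg) with h | h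
          · exact h
          · exact absurd h.symm (by omega)
        conv_rhs => rw [addMissingNumbers_alt]
        rw [if_neg hneg]
        have hk : (m + 1 - PySem.Str.len s).toNat = (m - PySem.Str.len s).toNat + 1 := by
          omega
        rw [hk]
        simp only [pvPerms]
        rw [List.map_flatMap]
        rw [List.flatMap_def, List.flatMap_def]
        congr 1
        apply List.map_congr_left
        intro i hiav
        rw [addMissingNumbers_alt]
        rw [hstep i hiav, pvAvail_append]
        rw [if_neg (by omega)]
        rw [show (m + 1 - (PySem.Str.len s + 1)).toNat = (m - PySem.Str.len s).toNat from by omega]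
        rw [List.map_map]
        apply List.map_congr_left
        intro p _
        simp only [Function.comp]
        rw [List.map_cons, join_empty_cons, String.append_assoc]

-- ===== VERDICT (by name: the statement is the Claim_ definition above) =====
theorem addMissingNumbers_spec : Claim_equal_addMissingNumbers := by
  intro ns s m _ hpre
  unfold Spec_addMissingNumbers
  exact A_eq_B m hpre _ ns s rfl
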